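-- pv_equiv track=rewrite | github.com/BensonZhou1991/quantum-network-simulation | protocol/swapping.py | hop_by_hop_power
-- ===== SOURCE A (Python) =====
-- def hop_by_hop_power(num_ele_link):
--     '''
--     calculate # times that each elementary link is involved in a hop-by-hop
--     swapping protocol
--     '''
--     power = [0] * num_ele_link
--     # init current link
--     current_link = []
--     for i in range(num_ele_link):
--         current_link.append([i])
--     next_link = current_link.pop(0)
--     # try to get an end-to-end link via swapping
--     while len(current_link) > 0:
--         # gen new link via swapping
--         next_link.extend(current_link.pop(0))
--         # update power number
--         for i in next_link:
--             power[i] += 1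
--     return power
-- ===== SOURCE B (Python) =====
-- def hop_by_hop_power(num_ele_link):
--     if num_ele_link <= 0:
--         return []
--     return [num_ele_link - 1] + [num_ele_link - i for i in range(1, num_ele_link)]
-- ===== Notes on version B (the rewrite author's own statement) =====
-- stated objective: faster
-- what changed: Replaced the simulated hop-by-hop swapping loop (repeatedly extending a link list and incrementing a counter per member, O(n^2) work) by the closed form power = [n-1] + [n-i for i in 1..n-1].
-- outside the precondition, e.g. on hop_by_hop_power(0): A raises IndexError, B returns []
import Mathlib
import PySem

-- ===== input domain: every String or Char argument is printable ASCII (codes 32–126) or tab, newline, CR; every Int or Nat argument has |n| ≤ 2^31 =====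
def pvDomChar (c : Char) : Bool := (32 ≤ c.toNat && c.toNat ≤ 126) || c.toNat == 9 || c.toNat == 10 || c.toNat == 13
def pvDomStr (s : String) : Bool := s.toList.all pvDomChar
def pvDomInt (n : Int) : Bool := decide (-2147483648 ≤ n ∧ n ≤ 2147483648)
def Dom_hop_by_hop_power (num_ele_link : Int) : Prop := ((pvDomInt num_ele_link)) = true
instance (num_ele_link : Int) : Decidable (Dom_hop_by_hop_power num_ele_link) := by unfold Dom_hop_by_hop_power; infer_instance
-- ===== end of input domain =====

-- B replaces A's quadratic simulated swapping loop by the closed form [n-1] + [n-i for i in 1..n-1].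

-- ===== PORT A =====
-- power[i] += 1 (i is always a nonnegative in-range index in A's loop)
def pvInc (power : List Int) (i : Int) : List Int :=
  power.set i.toNat (power.getD i.toNat 0 + 1)

-- the 'while len(current_link) > 0' loop
def pvSwapLoop (power : List Int) (nxt : List Int) : List (List Int) → List Int
  | [] => power
  | c :: rest =>
      let nxt' := nxt ++ c
      pvSwapLoop (nxt'.foldl pvInc power) nxt' rest

def hop_by_hop_power (num_ele_link : Int) : List Int :=
  let power : List Int := List.replicate num_ele_link.toNat 0
  let current_link : List (List Int) := (PySem.List.pyRange 0 num_ele_link 1).map (fun i => [i])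
  match current_link with
  | [] => power   -- Python raises IndexError here (pop from empty list); excluded by Pre_
  | nxt :: rest => pvSwapLoop power nxt rest

-- ===== PORT B =====
def hop_by_hop_power_alt (num_ele_link : Int) : List Int :=
  if num_ele_link ≤ 0 then []
  else [num_ele_link - 1] ++ (PySem.List.pyRange 1 num_ele_link 1).map (fun i => num_ele_link - i)

-- ===== PRECONDITION & SPEC =====
-- Pre_ excludes exactly num_ele_link <= 0, where A raises IndexError (pop from an empty list).
def Pre_hop_by_hop_power (num_ele_link : Int) : Prop := 1 ≤ num_ele_link
instance (num_ele_link : Int) : Decidable (Pre_hop_by_hop_power num_ele_link) := by unfold Pre_hop_by_hop_power; infer_instance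
def pvWitness_hop_by_hop_power : Int := (3)

def Spec_hop_by_hop_power (num_ele_link : Int) (out : List Int) : Prop := out = hop_by_hop_power_alt num_ele_link
instance (num_ele_link : Int) (out : List Int) : Decidable (Spec_hop_by_hop_power num_ele_link out) := by unfold Spec_hop_by_hop_power; infer_instance

-- ===== CLAIM (what is proved, stated in full; the proofs are below) =====
def Claim_equal_hop_by_hop_power : Prop := ∀ (num_ele_link : Int), Dom_hop_by_hop_power num_ele_link → Pre_hop_by_hop_power num_ele_link → Spec_hop_by_hop_power num_ele_link (hop_by_hop_power num_ele_link)

-- ===== LEMMAS AND PROOFS =====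

-- closed-form counter: after merge step k, link i has been involved pvCnt k i times
def pvCnt (k i : Nat) : Int := if i = 0 then (k : Int) else if i ≤ k then (k : Int) + 1 - (i : Int) else 0

def pvP (m k : Nat) : List Int := (List.range m).map (pvCnt k)

def pvNxt (k : Nat) : List Int := (List.range (k + 1)).map (Nat.cast : Nat → Int)

def pvRest (s r : Nat) : List (List Int) := (List.range' s r).map (fun i => ([Nat.cast i] : List Int))

lemma pvInc_length (P : List Int) (i : Int) : (pvInc P i).length = P.length := by
  simp [pvInc]

lemma foldl_pvInc_length (is : List Int) (P : List Int) :
    (is.foldl pvInc P).length = P.length := by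
  induction is generalizing P with
  | nil => rfl
  | cons a is ih => simp [List.foldl, ih, pvInc_length]

lemma foldl_pvInc_getD (is : List Int) (P : List Int)
    (h : ∀ i ∈ is, 0 ≤ i ∧ i.toNat < P.length) (t : Nat) :
    (is.foldl pvInc P).getD t 0 = P.getD t 0 + is.count (t : Int) := by
  induction is generalizing P with
  | nil => simp
  | cons a is ih =>
      obtain ⟨ha0, halt⟩ := h a (by simp)
      have hlen : (pvInc P a).length = P.length := pvInc_length P a
      have ih' := ih (pvInc P a) (by
        intro i hi
        obtain ⟨h1, h2⟩ := h i (by simp [hi])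
        exact ⟨h1, by omega⟩)
      simp only [List.foldl_cons, ih', List.count_cons]
      have hget : (pvInc P a).getD t 0 = P.getD t 0 + (if a = (t : Int) then 1 else 0) := by
        by_cases hat : a.toNat = t
        · have heq : a = (t : Int) := by omega
          have htlt : t < P.length := hat ▸ halt
          simp [pvInc, List.getD, heq, htlt]
        · have hne : ¬ a = (t : Int) := by omega
          simp [pvInc, List.getD, hat, hne]
      rw [hget]
      by_cases hat : a = (t : Int)
      · simp [hat]; ring
      · simp [hat]

lemma pvNxt_mem (k : Nat) (i : Int) (hi : i ∈ pvNxt k) : 0 ≤ i ∧ i.toNat < k + 1 := by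
  simp only [pvNxt, List.mem_map] at hi
  obtain ⟨j, hj, rfl⟩ := hi
  simp only [List.mem_range] at hj
  exact ⟨Int.natCast_nonneg j, by simpa using hj⟩

lemma pvNxt_count (k t : Nat) :
    (pvNxt k).count ((t : Int)) = if t ≤ k then 1 else 0 := by
  have hnd : (pvNxt k).Nodup := by
    unfold pvNxt
    exact List.Nodup.map (fun a b hab => by exact_mod_cast hab) List.nodup_range
  by_cases ht : t ≤ k
  · rw [if_pos ht]
    exact List.count_eq_one_of_mem hnd (by
      simp only [pvNxt, List.mem_map, List.mem_range]
      exact ⟨t, by omega, rfl⟩)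
  · rw [if_neg ht]
    refine List.count_eq_zero_of_not_mem ?_
    simp only [pvNxt, List.mem_map, List.mem_range]
    rintro ⟨j, hj, hjt⟩
    have : j = t := by exact_mod_cast hjt
    omega

lemma pvP_length (m k : Nat) : (pvP m k).length = m := by simp [pvP]

lemma pvP_getD (m k t : Nat) (ht : t < m) : (pvP m k).getD t 0 = pvCnt k t := by
  simp [pvP, List.getD, ht]

lemma pv_step (m k : Nat) (hk : k + 1 < m) :
    (pvNxt (k + 1)).foldl pvInc (pvP m k) = pvP m (k + 1) := by
  have hlen : ((pvNxt (k + 1)).foldl pvInc (pvP m k)).length = m := by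
    rw [foldl_pvInc_length, pvP_length]
  apply List.ext_getElem (by rw [hlen, pvP_length])
  intro t h1 h2
  have htm : t < m := by rwa [hlen] at h1
  have e1 : ((pvNxt (k + 1)).foldl pvInc (pvP m k))[t]'h1
      = ((pvNxt (k + 1)).foldl pvInc (pvP m k)).getD t 0 := by
    simp [List.getD, List.getElem?_eq_getElem h1]
  have e2 : (pvP m (k + 1))[t]'h2 = (pvP m (k + 1)).getD t 0 := by
    simp [List.getD, List.getElem?_eq_getElem h2]
  rw [e1, e2]
  rw [foldl_pvInc_getD _ _ (fun i hi => by
        have := pvNxt_mem _ _ hi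
        rw [pvP_length]; omega) t]
  rw [pvP_getD m k t htm, pvP_getD m (k + 1) t htm, pvNxt_count]
  simp only [pvCnt]
  split_ifs <;> push_cast <;> omega

lemma pvNxt_succ (k : Nat) : pvNxt k ++ [((k + 1 : Nat) : Int)] = pvNxt (k + 1) := by
  simp [pvNxt, List.range_succ]

lemma pv_loop (m : Nat) (r k : Nat) (hkr : k + r = m - 1) (hm : 1 ≤ m) (hk : k ≤ m - 1) :
    pvSwapLoop (pvP m k) (pvNxt k) (pvRest (k + 1) r) = pvP m (m - 1) := by
  induction r generalizing k with
  | zero =>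
      have : k = m - 1 := by omega
      simp [pvRest, pvSwapLoop, this]
  | succ r ih =>
      rw [pvRest, List.range'_succ, List.map_cons]
      show pvSwapLoop _ _ (([((k + 1 : Nat) : Int)]) :: pvRest (k + 1 + 1) r) = _
      rw [pvSwapLoop]
      simp only [pvNxt_succ]
      rw [pv_step m k (by omega)]
      exact ih (k + 1) (by omega) (by omega)

lemma pv_range_eq (m : Nat) :
    PySem.List.pyRange 0 (m : Int) 1 = (List.range m).map (Nat.cast : Nat → Int) := by
  rw [PySem.List.pyRange_one]
  have h : ((m : Int) - 0).toNat = m := by omega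
  rw [h]
  apply List.map_congr_left
  intro a _
  simp

lemma pvP_zero (m : Nat) : List.replicate m (0 : Int) = pvP m 0 := by
  apply List.ext_getElem (by simp [pvP_length])
  intro t h1 h2
  simp only [List.getElem_replicate, pvP, List.getElem_map, List.getElem_range]
  simp only [pvCnt]
  split_ifs <;> omega

lemma pv_final (m : Nat) (hm : 1 ≤ m) :
    pvP m (m - 1) = [((m : Int) - 1)]
      ++ (List.range (m - 1)).map (fun k => (m : Int) - (1 + (Nat.cast k : Int))) := by
  obtain ⟨m', rfl⟩ : ∃ m', m = m' + 1 := ⟨m - 1, by omega⟩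
  simp only [Nat.add_sub_cancel]
  rw [pvP, List.range_succ_eq_map, List.map_cons, List.map_map]
  congr 1
  · simp [pvCnt]
  · simp only [List.append_eq, List.nil_append]
    apply List.map_congr_left
    intro a ha
    simp only [List.mem_range] at ha
    simp only [Function.comp, pvCnt, Nat.succ_ne_zero, if_false]
    rw [if_pos (by omega)]
    push_cast
    ring

-- ===== VERDICT (by name: the statement is the Claim_ definition above) =====
theorem hop_by_hop_power_spec : Claim_equal_hop_by_hop_power := by
  intro n _ hpre
  unfold Spec_hop_by_hop_power
  have h1 : (1 : Int) ≤ n := hpre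
  obtain ⟨m, rfl⟩ : ∃ m : Nat, n = (m : Int) := ⟨n.toNat, by omega⟩
  have hm : 1 ≤ m := by exact_mod_cast h1
  -- A side: the loop computes pvP m (m - 1)
  unfold hop_by_hop_power
  rw [pv_range_eq, List.map_map, Int.toNat_natCast]
  have hrange : List.range m = 0 :: List.range' 1 (m - 1) := by
    rw [List.range_eq_range']
    obtain ⟨m', rfl⟩ : ∃ m', m = m' + 1 := ⟨m - 1, by omega⟩
    simp [List.range'_succ]
  rw [hrange, List.map_cons]
  show pvSwapLoop (List.replicate m 0) [((0 : Nat) : Int)] (pvRest 1 (m - 1)) = _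
  have hnxt0 : [((0 : Nat) : Int)] = pvNxt 0 := by simp [pvNxt]
  rw [pvP_zero, hnxt0]
  rw [show pvRest 1 (m - 1) = pvRest (0 + 1) (m - 1) from rfl]
  rw [pv_loop m (m - 1) 0 (by omega) hm (by omega)]
  -- B side equals the same closed form
  unfold hop_by_hop_power_alt
  rw [if_neg (by omega)]
  rw [pv_final m hm]
  congr 1
  rw [PySem.List.pyRange_one]
  have h2 : ((m : Int) - 1).toNat = m - 1 := by omega
  rw [h2, List.map_map]
  apply List.map_congr_left
  intro a _
  simp [Function.comp]
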